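-- pv_equiv track=rewrite | github.com/bpnsingh/practice | scaler/Hashmaps/largestcontseqzerosum.py | get_max_distance_duplicate
-- ===== SOURCE A (Python) =====
-- def get_max_distance_duplicate(A):
--     N = len(A)
--     ans = -10**6
--     freq_map = dict()
--     start = -1
--     end = -1
--     for i in range(N):
--         if A[i] not in freq_map:
--             # if fist occurance then update dict with element aganist its index
--             freq_map[A[i]] = i
--         else:
--             # if its duplicate, get the difference of current and last found index
--             temp = i - freq_map[A[i]]
--             if temp > ans:
--                 ans = temp
--                 end = i
--                 start = freq_map[A[i]]
--             # don need to update latest index in dict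
--     return [start, end]
-- ===== SOURCE B (Python) =====
-- def get_max_distance_duplicate(A):
--     # B: one table-building pass (first & last occurrence per value), then a loop
--     # over the DISTINCT values in first-occurrence order picking the widest span.
--     first = {}
--     last = {}
--     for i, x in enumerate(A):
--         if x not in first:
--             first[x] = i
--         last[x] = i
--     ans = -10**6
--     start = -1
--     end = -1
--     for x in first:
--         if last[x] != first[x]:
--             d = last[x] - first[x]
--             if d > ans:
--                 ans = d
--                 start = first[x]
--                 end = last[x]
--     return [start, end]
-- ===== Notes on version B (the rewrite author's own statement) =====
-- stated objective: alternative
-- what changed: Replaces A's per-index loop (which compares each element against its first occurrence and maintains a running best inline) by a per-distinct-value decomposition: one pass builds first- and last-occurrence tables, then a second loop over the distinct values in first-occurrence order picks the widest span last[x]-first[x]; strict > in first-occurrence order reproduces A's tie-break because equal distances mean equal-ordered first indices.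
import Mathlib
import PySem

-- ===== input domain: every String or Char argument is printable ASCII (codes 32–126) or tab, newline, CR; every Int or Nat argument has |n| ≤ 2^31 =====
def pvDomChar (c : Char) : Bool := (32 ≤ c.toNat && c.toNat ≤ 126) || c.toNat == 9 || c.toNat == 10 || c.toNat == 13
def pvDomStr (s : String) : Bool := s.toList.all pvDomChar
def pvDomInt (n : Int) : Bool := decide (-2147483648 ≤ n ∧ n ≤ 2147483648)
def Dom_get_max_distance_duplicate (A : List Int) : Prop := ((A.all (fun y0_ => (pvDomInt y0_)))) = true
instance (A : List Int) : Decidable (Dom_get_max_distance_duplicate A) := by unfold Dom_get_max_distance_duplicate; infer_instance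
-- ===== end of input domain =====

-- B replaces A's per-index running-best loop by a per-distinct-value decomposition:
-- build first/last occurrence tables in one pass, then scan the distinct values
-- in first-occurrence order for the widest span (objective: alternative).

-- ===== PORT A =====
def get_max_distance_duplicate (A : List Int) : List Int :=
  let N : Int := A.length
  let st :=
    (PySem.List.pyRange 0 N 1).foldl
      (fun (s : Int × PySem.Dict Int Int × Int × Int) i =>
        let x := PySem.List.pyGetD A i 0
        if s.2.1.contains x = false then
          (s.1, s.2.1.insert x i, s.2.2.1, s.2.2.2)
        else
          let temp := i - s.2.1.getD x 0
          if temp > s.1 then (temp, s.2.1, s.2.1.getD x 0, i)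
          else (s.1, s.2.1, s.2.2.1, s.2.2.2))
      (-10 ^ 6, PySem.Dict.empty, -1, -1)
  [st.2.2.1, st.2.2.2]

-- ===== PORT B =====
def get_max_distance_duplicate_alt (A : List Int) : List Int :=
  let fl : PySem.Dict Int Int × PySem.Dict Int Int :=
    (PySem.List.enumerate A).foldl
      (fun (s : PySem.Dict Int Int × PySem.Dict Int Int) p =>
        ((if s.1.contains p.2 = false then s.1.insert p.2 p.1 else s.1),
         s.2.insert p.2 p.1))
      (PySem.Dict.empty, PySem.Dict.empty)
  let st :=
    fl.1.keys.foldl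
      (fun (s : Int × Int × Int) x =>
        if fl.2.getD x 0 ≠ fl.1.getD x 0 then
          let d := fl.2.getD x 0 - fl.1.getD x 0
          if d > s.1 then (d, fl.1.getD x 0, fl.2.getD x 0) else s
        else s)
      (-10 ^ 6, -1, -1)
  [st.2.1, st.2.2]

-- ===== PRECONDITION & SPEC =====
def Spec_get_max_distance_duplicate (A : List Int) (out : List Int) : Prop := out = get_max_distance_duplicate_alt A
instance (A : List Int) (out : List Int) : Decidable (Spec_get_max_distance_duplicate A out) := by unfold Spec_get_max_distance_duplicate; infer_instance

-- ===== CLAIM (what is proved, stated in full; the proofs are below) =====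
def Claim_equal_get_max_distance_duplicate : Prop := ∀ (A : List Int), Dom_get_max_distance_duplicate A → Spec_get_max_distance_duplicate A (get_max_distance_duplicate A)

-- ===== LEMMAS AND PROOFS =====

-- first index of y in l, indices starting at s
def pvFidx (l : List Int) (s : Int) (y : Int) : Option Int :=
  match l with
  | [] => none
  | x :: t => if x = y then some s else pvFidx t (s + 1) y

-- last index of y in l, indices starting at s
def pvLidx (l : List Int) (s : Int) (y : Int) : Option Int :=
  match l with
  | [] => none
  | x :: t =>
    match pvLidx t (s + 1) y with
    | some j => some j
    | none => if x = y then some s else none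

-- the distinct values of A in first-occurrence order
def pvKeys (A : List Int) : List Int :=
  A.foldl (fun ks x => if x ∈ ks then ks else ks ++ [x]) []

-- A's / B's per-candidate update (strict improvement)
def pvStepB (b : Int × Int × Int) (t : Int × Int × Int) : Int × Int × Int :=
  if t.1 > b.1 then t else b

-- B's per-distinct-value step, phrased with pvFidx/pvLidx
def pvStepK (A : List Int) (s : Int × Int × Int) (y : Int) : Int × Int × Int :=
  if (pvLidx A 0 y).getD 0 ≠ (pvFidx A 0 y).getD 0 then
    pvStepB s ((pvLidx A 0 y).getD 0 - (pvFidx A 0 y).getD 0,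
               (pvFidx A 0 y).getD 0, (pvLidx A 0 y).getD 0)
  else s

-- reference result triple (ans, start, end)
def pvB (A : List Int) : Int × Int × Int :=
  (pvKeys A).foldl (pvStepK A) (-10 ^ 6, -1, -1)

-- A's loop step on an enumerated element
def pvStepA (s : Int × PySem.Dict Int Int × Int × Int) (p : Int × Int) :
    Int × PySem.Dict Int Int × Int × Int :=
  if s.2.1.contains p.2 = false then
    (s.1, s.2.1.insert p.2 p.1, s.2.2.1, s.2.2.2)
  else
    let temp := p.1 - s.2.1.getD p.2 0
    if temp > s.1 then (temp, s.2.1, s.2.1.getD p.2 0, p.1)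
    else (s.1, s.2.1, s.2.2.1, s.2.2.2)

theorem pvFidx_bounds (l : List Int) (s y j : Int) (h : pvFidx l s y = some j) :
    s ≤ j ∧ j < s + l.length := by
  induction l generalizing s with
  | nil => simp [pvFidx] at h
  | cons x t ih =>
    simp only [pvFidx] at h
    split at h
    · cases h; simp
    · have := ih (s + 1) h
      simp [List.length_cons] at this ⊢
      omega

theorem pvLidx_bounds (l : List Int) (s y j : Int) (h : pvLidx l s y = some j) :
    s ≤ j ∧ j < s + l.length := by
  induction l generalizing s with
  | nil => simp [pvLidx] at h
  | cons x t ih =>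
    cases hl : pvLidx t (s + 1) y with
    | some j' =>
      simp only [pvLidx, hl] at h
      cases h
      have := ih (s + 1) hl
      simp [List.length_cons] at this ⊢; omega
    | none =>
      simp only [pvLidx, hl] at h
      split at h
      · cases h; simp
      · cases h

theorem pvFidx_isSome_iff_mem (l : List Int) (s y : Int) :
    (pvFidx l s y).isSome = true ↔ y ∈ l := by
  induction l generalizing s with
  | nil => simp [pvFidx]
  | cons x t ih =>
    simp only [pvFidx, List.mem_cons]
    by_cases hx : x = y
    · simp [hx]
    · simp [hx, ih (s + 1), Ne.symm hx]

theorem pvLidx_isSome_iff_mem (l : List Int) (s y : Int) :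
    (pvLidx l s y).isSome = true ↔ y ∈ l := by
  induction l generalizing s with
  | nil => simp [pvLidx]
  | cons x t ih =>
    simp only [pvLidx, List.mem_cons]
    cases hl : pvLidx t (s + 1) y with
    | some j => simp [(ih (s + 1)).1 (by simp [hl])]
    | none =>
      have : ¬ y ∈ t := by rw [← ih (s + 1)]; simp [hl]
      by_cases hx : x = y
      · simp [hx, this]
      · simp [hx, this, Ne.symm hx]

theorem pvFidx_append (l1 l2 : List Int) (s y : Int) :
    pvFidx (l1 ++ l2) s y =
      (match pvFidx l1 s y with
       | some j => some j
       | none => pvFidx l2 (s + l1.length) y) := by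
  induction l1 generalizing s with
  | nil => simp [pvFidx]
  | cons x t ih =>
    simp only [List.cons_append, pvFidx]
    split
    · rfl
    · rw [ih]
      have e : s + 1 + (t.length : Int) = s + ((x :: t).length : Int) := by
        simp; ring
      rw [e]

theorem pvLidx_append (l1 l2 : List Int) (s y : Int) :
    pvLidx (l1 ++ l2) s y =
      (match pvLidx l2 (s + l1.length) y with
       | some j => some j
       | none => pvLidx l1 s y) := by
  induction l1 generalizing s with
  | nil =>
    simp only [List.nil_append, List.length_nil, Nat.cast_zero, add_zero]
    cases pvLidx l2 s y <;> simp [pvLidx]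
  | cons x t ih =>
    simp only [List.cons_append, pvLidx]
    rw [ih]
    have e : s + 1 + (t.length : Int) = s + ((x :: t).length : Int) := by
      simp; ring
    rw [e]
    cases pvLidx l2 (s + ((x :: t).length : Int)) y <;> simp

-- snoc laws
theorem pvFidx_snoc (A : List Int) (x y : Int) :
    pvFidx (A ++ [x]) 0 y =
      (match pvFidx A 0 y with
       | some j => some j
       | none => if x = y then some (A.length : Int) else none) := by
  rw [pvFidx_append]
  cases pvFidx A 0 y <;> simp [pvFidx]

theorem pvLidx_snoc (A : List Int) (x y : Int) :
    pvLidx (A ++ [x]) 0 y =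
      if x = y then some (A.length : Int) else pvLidx A 0 y := by
  rw [pvLidx_append]
  by_cases hx : x = y
  · simp [pvLidx, hx]
  · simp [pvLidx, hx]

theorem pvKeys_snoc (A : List Int) (x : Int) :
    pvKeys (A ++ [x]) = if x ∈ pvKeys A then pvKeys A else pvKeys A ++ [x] := by
  unfold pvKeys
  rw [List.foldl_append]
  rfl

theorem mem_pvKeys (A : List Int) (y : Int) : y ∈ pvKeys A ↔ y ∈ A := by
  induction A using List.reverseRecOn with
  | nil => simp [pvKeys]
  | append_singleton A x ih =>
    rw [pvKeys_snoc]
    by_cases hx : x ∈ pvKeys A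
    · simp [hx, ih]
      intro h; rw [← h] at hx; exact ih.mp hx
    · simp [hx, ih]

theorem pvKeys_pairwise (A : List Int) :
    (pvKeys A).Pairwise
      (fun a b => (pvFidx A 0 a).getD 0 < (pvFidx A 0 b).getD 0) := by
  induction A using List.reverseRecOn with
  | nil => simp [pvKeys]
  | append_singleton A x ih =>
    have hpres : ∀ y ∈ pvKeys A, pvFidx (A ++ [x]) 0 y = pvFidx A 0 y := by
      intro y hy
      have : (pvFidx A 0 y).isSome = true :=
        (pvFidx_isSome_iff_mem A 0 y).mpr ((mem_pvKeys A y).mp hy)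
      cases hf : pvFidx A 0 y with
      | none => rw [hf] at this; cases this
      | some j => rw [pvFidx_snoc, hf]
    rw [pvKeys_snoc]
    by_cases hx : x ∈ pvKeys A
    · simp only [hx, if_true]
      exact ih.imp_of_mem (fun {a b} ha hb h => by
        rw [hpres a ha, hpres b hb]; exact h)
    · simp only [hx, if_false]
      rw [List.pairwise_append]
      refine ⟨ih.imp_of_mem (fun {a b} ha hb h => by
        rw [hpres a ha, hpres b hb]; exact h), by simp, ?_⟩
      intro a ha b hb
      simp only [List.mem_singleton] at hb
      rw [hb, hpres a ha]
      have hmemA : a ∈ A := (mem_pvKeys A a).mp ha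
      have hsome : (pvFidx A 0 a).isSome = true :=
        (pvFidx_isSome_iff_mem A 0 a).mpr hmemA
      have hxn : pvFidx A 0 x = none := by
        cases hf : pvFidx A 0 x with
        | none => rfl
        | some j =>
          exact absurd ((mem_pvKeys A x).mpr
            ((pvFidx_isSome_iff_mem A 0 x).mp (by simp [hf]))) hx
      have hxb : pvFidx (A ++ [x]) 0 x = some (A.length : Int) := by
        rw [pvFidx_snoc, hxn]; simp
      cases hf : pvFidx A 0 a with
      | none => rw [hf] at hsome; cases hsome
      | some j =>
        have hbnd := pvFidx_bounds A 0 a j hf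
        rw [hxb]
        simp only [Option.getD_some]
        omega

theorem pvKeys_nodup (A : List Int) : (pvKeys A).Nodup := by
  have := pvKeys_pairwise A
  exact this.imp (fun h => by intro he; rw [he] at h; omega)

theorem pvStepB_eq_of_lt (b : Int × Int × Int) (d p q : Int) (h : b.1 < d) :
    pvStepB b (d, p, q) = (d, p, q) := by
  unfold pvStepB; rw [if_pos (by omega)]

theorem pvStepB_eq_of_ge (b : Int × Int × Int) (d p q : Int) (h : d ≤ b.1) :
    pvStepB b (d, p, q) = b := by
  unfold pvStepB; rw [if_neg (by omega)]

-- === generic fold facts for pvStepK ===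
theorem pvStepK_fst_cases (A : List Int) (s : Int × Int × Int) (y : Int) :
    (pvStepK A s y).1 = s.1 ∨
      (pvStepK A s y).1 = (pvLidx A 0 y).getD 0 - (pvFidx A 0 y).getD 0 := by
  unfold pvStepK pvStepB
  split
  · split
    · right; rfl
    · left; rfl
  · left; rfl

theorem pvFoldK_mono (A : List Int) (S : List Int) (s : Int × Int × Int) :
    s.1 ≤ (S.foldl (pvStepK A) s).1 := by
  induction S generalizing s with
  | nil => simp
  | cons y t ih =>
    refine le_trans ?_ (ih (pvStepK A s y))
    unfold pvStepK pvStepB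
    split
    · split
      · omega
      · exact le_refl _
    · exact le_refl _

theorem pvFoldK_lt (A : List Int) (S : List Int) (s : Int × Int × Int) (D : Int)
    (hs : s.1 < D)
    (hS : ∀ y ∈ S, (pvLidx A 0 y).getD 0 - (pvFidx A 0 y).getD 0 < D) :
    (S.foldl (pvStepK A) s).1 < D := by
  induction S generalizing s with
  | nil => simpa
  | cons y t ih =>
    simp only [List.foldl_cons]
    refine ih (pvStepK A s y) ?_ (fun z hz => hS z (by simp [hz]))
    rcases pvStepK_fst_cases A s y with h | h
    · omega
    · have := hS y (by simp); omega

theorem pvFoldK_fix (A : List Int) (S : List Int) (s : Int × Int × Int)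
    (hS : ∀ y ∈ S, (pvLidx A 0 y).getD 0 - (pvFidx A 0 y).getD 0 < s.1) :
    S.foldl (pvStepK A) s = s := by
  induction S with
  | nil => rfl
  | cons y t ih =>
    have hy := hS y (by simp)
    have hstep : pvStepK A s y = s := by
      unfold pvStepK pvStepB
      split
      · rw [if_neg (by omega)]
      · rfl
    simp only [List.foldl_cons, hstep]
    exact ih (fun z hz => hS z (by simp [hz]))

-- step functions agree on elements of A when A is extended by a fresh-or-different element
theorem pvStepK_snoc_ne (A : List Int) (x y : Int) (hy : y ∈ A) (hne : y ≠ x) :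
    ∀ s, pvStepK (A ++ [x]) s y = pvStepK A s y := by
  intro s
  have hf : pvFidx (A ++ [x]) 0 y = pvFidx A 0 y := by
    have : (pvFidx A 0 y).isSome = true := (pvFidx_isSome_iff_mem A 0 y).mpr hy
    cases hfx : pvFidx A 0 y with
    | none => rw [hfx] at this; cases this
    | some j => rw [pvFidx_snoc, hfx]
  have hl : pvLidx (A ++ [x]) 0 y = pvLidx A 0 y := by
    rw [pvLidx_snoc, if_neg (fun h => hne h.symm)]
  unfold pvStepK
  rw [hf, hl]

theorem pvKeys_vals (A : List Int) (y : Int) (hy : y ∈ A) :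
    ∃ fy ly, pvFidx A 0 y = some fy ∧ pvLidx A 0 y = some ly ∧
      0 ≤ fy ∧ fy < (A.length : Int) ∧ 0 ≤ ly ∧ ly < (A.length : Int) := by
  have hf := (pvFidx_isSome_iff_mem A 0 y).mpr hy
  have hl := (pvLidx_isSome_iff_mem A 0 y).mpr hy
  cases hfe : pvFidx A 0 y with
  | none => rw [hfe] at hf; cases hf
  | some fy =>
    cases hle : pvLidx A 0 y with
    | none => rw [hle] at hl; cases hl
    | some ly =>
      have b1 := pvFidx_bounds A 0 y fy hfe
      have b2 := pvLidx_bounds A 0 y ly hle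
      exact ⟨fy, ly, rfl, rfl, by omega, by omega, by omega, by omega⟩

-- main snoc lemma for the reference triple
theorem pvB_snoc (A : List Int) (x : Int) :
    pvB (A ++ [x]) =
      if x ∈ A then
        pvStepB (pvB A)
          ((A.length : Int) - (pvFidx A 0 x).getD 0, (pvFidx A 0 x).getD 0,
            (A.length : Int))
      else pvB A := by
  by_cases hmem : x ∈ A
  · simp only [hmem, if_true]
    obtain ⟨fx, lx, hfx, hlx, hfx0, hfxlt, hlx0, hlxlt⟩ := pvKeys_vals A x hmem
    have hkx : x ∈ pvKeys A := (mem_pvKeys A x).mpr hmem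
    obtain ⟨P, S, hsplit⟩ := List.append_of_mem hkx
    have hnd := pvKeys_nodup A
    rw [hsplit, List.nodup_append] at hnd
    obtain ⟨-, hndxS, hdisj⟩ := hnd
    have hxP : x ∉ P := fun h => hdisj x h x (by simp) rfl
    have hxS : x ∉ S := (List.nodup_cons.mp hndxS).1
    have hpw := pvKeys_pairwise A
    rw [hsplit, List.pairwise_append] at hpw
    have hxS_lt : ∀ y ∈ S, fx < (pvFidx A 0 y).getD 0 := by
      intro y hy
      have h := (List.pairwise_cons.mp hpw.2.1).1 y hy
      rw [hfx] at h; simpa using h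
    have hmemP : ∀ y ∈ P, y ∈ A ∧ y ≠ x := by
      intro y hy
      have hym : y ∈ pvKeys A := by rw [hsplit]; exact List.mem_append_left _ hy
      exact ⟨(mem_pvKeys A y).mp hym, fun he => hxP (he ▸ hy)⟩
    have hmemS : ∀ y ∈ S, y ∈ A ∧ y ≠ x := by
      intro y hy
      have hym : y ∈ pvKeys A := by
        rw [hsplit]; exact List.mem_append_right _ (List.mem_cons_of_mem _ hy)
      exact ⟨(mem_pvKeys A y).mp hym, fun he => hxS (he ▸ hy)⟩
    have hfx' : pvFidx (A ++ [x]) 0 x = some fx := by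
      rw [pvFidx_snoc, hfx]
    have hlx' : pvLidx (A ++ [x]) 0 x = some (A.length : Int) := by
      rw [pvLidx_snoc, if_pos rfl]
    have hstepx : ∀ s0 : Int × Int × Int, pvStepK (A ++ [x]) s0 x =
        pvStepB s0 ((A.length : Int) - fx, fx, (A.length : Int)) := by
      intro s0
      unfold pvStepK
      rw [hfx', hlx']
      simp only [Option.getD_some]
      rw [if_pos (by omega)]
    have hcand : ∀ y ∈ S,
        (pvLidx A 0 y).getD 0 - (pvFidx A 0 y).getD 0 < (A.length : Int) - fx := by
      intro y hy
      obtain ⟨fy, ly, hfy, hly, _, _, _, hlylt⟩ := pvKeys_vals A y (hmemS y hy).1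
      have hlt := hxS_lt y hy
      rw [hfy] at hlt
      rw [hfy, hly]
      simp only [Option.getD_some] at hlt ⊢
      omega
    unfold pvB
    rw [pvKeys_snoc, if_pos hkx, hsplit, hfx]
    simp only [Option.getD_some]
    rw [List.foldl_append, List.foldl_append, List.foldl_cons, List.foldl_cons]
    have hPfold : ∀ s0 : Int × Int × Int,
        P.foldl (pvStepK (A ++ [x])) s0 = P.foldl (pvStepK A) s0 := fun s0 =>
      PySem.List.foldl_congr_mem P _ _ s0
        (fun acc y hy => pvStepK_snoc_ne A x y (hmemP y hy).1 (hmemP y hy).2 acc)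
    have hSfold : ∀ s0 : Int × Int × Int,
        S.foldl (pvStepK (A ++ [x])) s0 = S.foldl (pvStepK A) s0 := fun s0 =>
      PySem.List.foldl_congr_mem S _ _ s0
        (fun acc y hy => pvStepK_snoc_ne A x y (hmemS y hy).1 (hmemS y hy).2 acc)
    rw [hPfold, hstepx, hSfold]
    by_cases hD : (A.length : Int) - fx >
        (P.foldl (pvStepK A) (-10 ^ 6, -1, -1)).1
    · have h1 : pvStepB (P.foldl (pvStepK A) (-10 ^ 6, -1, -1))
          ((A.length : Int) - fx, fx, (A.length : Int))
          = ((A.length : Int) - fx, fx, (A.length : Int)) := by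
        unfold pvStepB; rw [if_pos hD]
      rw [h1, pvFoldK_fix A S _ (fun y hy => by simpa using hcand y hy)]
      have h2 : (S.foldl (pvStepK A)
          (pvStepK A (P.foldl (pvStepK A) (-10 ^ 6, -1, -1)) x)).1
          < (A.length : Int) - fx := by
        refine pvFoldK_lt A S _ _ ?_ hcand
        rcases pvStepK_fst_cases A (P.foldl (pvStepK A) (-10 ^ 6, -1, -1)) x with h | h
        · omega
        · rw [hfx, hlx] at h; simp only [Option.getD_some] at h; omega
      exact (pvStepB_eq_of_lt _ _ _ _ h2).symm
    · have hstep_old : ∀ s0 : Int × Int × Int, (A.length : Int) - fx ≤ s0.1 →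
          pvStepK A s0 x = s0 := by
        intro s0 hs0
        unfold pvStepK pvStepB
        rw [hfx, hlx]
        simp only [Option.getD_some]
        by_cases hc : lx ≠ fx
        · rw [if_pos hc, if_neg (by omega)]
        · rw [if_neg hc]
      have h1 : pvStepB (P.foldl (pvStepK A) (-10 ^ 6, -1, -1))
          ((A.length : Int) - fx, fx, (A.length : Int))
          = P.foldl (pvStepK A) (-10 ^ 6, -1, -1) := by
        unfold pvStepB; rw [if_neg hD]
      rw [h1, hstep_old _ (by omega)]
      have hm := pvFoldK_mono A S (P.foldl (pvStepK A) (-10 ^ 6, -1, -1))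
      exact (pvStepB_eq_of_ge _ _ _ _ (le_trans (by omega) hm)).symm
  · simp only [hmem, if_false]
    have hkx : x ∉ pvKeys A := fun h => hmem ((mem_pvKeys A x).mp h)
    have hfxn : pvFidx A 0 x = none := by
      cases hf : pvFidx A 0 x with
      | none => rfl
      | some j =>
        exact absurd ((pvFidx_isSome_iff_mem A 0 x).mp (by simp [hf])) hmem
    unfold pvB
    rw [pvKeys_snoc, if_neg hkx, List.foldl_append, List.foldl_cons, List.foldl_nil]
    have hKfold : ∀ s0 : Int × Int × Int,
        (pvKeys A).foldl (pvStepK (A ++ [x])) s0 = (pvKeys A).foldl (pvStepK A) s0 :=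
      fun s0 => PySem.List.foldl_congr_mem (pvKeys A) _ _ s0 (fun acc y hy =>
        pvStepK_snoc_ne A x y ((mem_pvKeys A y).mp hy) (fun he => hkx (he ▸ hy)) acc)
    rw [hKfold]
    have hstepx : ∀ s0 : Int × Int × Int, pvStepK (A ++ [x]) s0 x = s0 := by
      intro s0
      unfold pvStepK
      rw [pvFidx_snoc, pvLidx_snoc, hfxn, if_pos rfl]
      simp
    rw [hstepx]

-- B's table-building pass and A's index loop, named for the proofs
def pvBuild (A : List Int) : PySem.Dict Int Int × PySem.Dict Int Int :=
  (PySem.List.enumerate A).foldl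
    (fun (s : PySem.Dict Int Int × PySem.Dict Int Int) p =>
      ((if s.1.contains p.2 = false then s.1.insert p.2 p.1 else s.1),
       s.2.insert p.2 p.1))
    (PySem.Dict.empty, PySem.Dict.empty)

def pvAfold (A : List Int) : Int × PySem.Dict Int Int × Int × Int :=
  (PySem.List.enumerate A).foldl pvStepA (-10 ^ 6, PySem.Dict.empty, -1, -1)

theorem pvBuild_snoc (A : List Int) (x : Int) :
    pvBuild (A ++ [x]) =
      ((if (pvBuild A).1.contains x = false then
          (pvBuild A).1.insert x (A.length : Int) else (pvBuild A).1),
       (pvBuild A).2.insert x (A.length : Int)) := by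
  unfold pvBuild
  rw [PySem.List.enumerate_append, PySem.List.enumerate_cons, PySem.List.enumerate_nil,
    List.foldl_append]
  simp only [List.foldl_cons, List.foldl_nil, zero_add]

theorem pvAfold_snoc (A : List Int) (x : Int) :
    pvAfold (A ++ [x]) = pvStepA (pvAfold A) ((A.length : Int), x) := by
  unfold pvAfold
  rw [PySem.List.enumerate_append, PySem.List.enumerate_cons, PySem.List.enumerate_nil,
    List.foldl_append]
  simp only [List.foldl_cons, List.foldl_nil, zero_add]

theorem pvBuild_char (A : List Int) :
    (∀ y, (pvBuild A).1.get? y = pvFidx A 0 y) ∧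
    (∀ y, (pvBuild A).2.get? y = pvLidx A 0 y) ∧
    (pvBuild A).1.keys = pvKeys A := by
  induction A using List.reverseRecOn with
  | nil =>
    refine ⟨fun y => ?_, fun y => ?_, ?_⟩ <;>
      simp [pvBuild, PySem.List.enumerate_nil, pvFidx, pvLidx, pvKeys,
        PySem.Dict.get?_empty, PySem.Dict.keys_empty]
  | append_singleton A x ih =>
    obtain ⟨h1, h2, h3⟩ := ih
    have hcont : (pvBuild A).1.contains x = (pvFidx A 0 x).isSome := by
      rw [PySem.Dict.contains_eq_isSome_get?, h1]
    by_cases hmem : x ∈ A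
    · have hsome : (pvFidx A 0 x).isSome = true :=
        (pvFidx_isSome_iff_mem A 0 x).mpr hmem
      have hcf : (pvBuild A).1.contains x = true := by rw [hcont, hsome]
      rw [pvBuild_snoc]
      refine ⟨fun y => ?_, fun y => ?_, ?_⟩
      · rw [if_neg (by simp [hcf])]
        rw [h1, pvFidx_snoc]
        cases hf : pvFidx A 0 y with
        | some j => rfl
        | none =>
          have : y ∉ A := by
            intro hy
            have := (pvFidx_isSome_iff_mem A 0 y).mpr hy
            rw [hf] at this; cases this
          have hne : x ≠ y := fun he => this (he ▸ hmem)
          simp [hne]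
      · simp only []
        rw [PySem.Dict.get?_insert, h2, pvLidx_snoc]
        by_cases hy : y = x
        · simp [hy]
        · simp [hy, Ne.symm hy]
      · rw [if_neg (by simp [hcf])]
        rw [h3, pvKeys_snoc, if_pos ((mem_pvKeys A x).mpr hmem)]
    · have hnone : pvFidx A 0 x = none := by
        cases hf : pvFidx A 0 x with
        | none => rfl
        | some j =>
          exact absurd ((pvFidx_isSome_iff_mem A 0 x).mp (by simp [hf])) hmem
      have hcf : (pvBuild A).1.contains x = false := by rw [hcont, hnone]; rfl
      rw [pvBuild_snoc]
      refine ⟨fun y => ?_, fun y => ?_, ?_⟩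
      · rw [if_pos hcf]
        rw [PySem.Dict.get?_insert, h1, pvFidx_snoc]
        by_cases hy : y = x
        · simp [hy, hnone]
        · cases hf : pvFidx A 0 y with
          | some j => simp [hy]
          | none => simp [hy, Ne.symm hy]
      · simp only []
        rw [PySem.Dict.get?_insert, h2, pvLidx_snoc]
        by_cases hy : y = x
        · simp [hy]
        · simp [hy, Ne.symm hy]
      · rw [if_pos hcf]
        rw [PySem.Dict.keys_insert_of_not_contains _ _ hcf, h3, pvKeys_snoc,
          if_neg (fun h => hmem ((mem_pvKeys A x).mp h))]

-- A's fold equals the reference triple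
theorem pvA_char (A : List Int) :
    ((pvAfold A).1, (pvAfold A).2.2.1, (pvAfold A).2.2.2) = pvB A ∧
      ∀ y, (pvAfold A).2.1.get? y = pvFidx A 0 y := by
  induction A using List.reverseRecOn with
  | nil =>
    constructor
    · rfl
    · intro y; simp [pvAfold, PySem.List.enumerate_nil, pvFidx, PySem.Dict.get?_empty]
  | append_singleton A x ih =>
    obtain ⟨h1, h2⟩ := ih
    have e1 : (pvAfold A).1 = (pvB A).1 := congrArg Prod.fst h1
    have e2 : (pvAfold A).2.2.1 = (pvB A).2.1 := congrArg (fun t => t.2.1) h1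
    have e3 : (pvAfold A).2.2.2 = (pvB A).2.2 := congrArg (fun t => t.2.2) h1
    have hcont : (pvAfold A).2.1.contains x = (pvFidx A 0 x).isSome := by
      rw [PySem.Dict.contains_eq_isSome_get?, h2]
    rw [pvAfold_snoc, pvB_snoc]
    by_cases hmem : x ∈ A
    · obtain ⟨fx, lx, hfx, hlx, hfx0, hfxlt, _, _⟩ := pvKeys_vals A x hmem
      have hcf : (pvAfold A).2.1.contains x = true := by
        rw [hcont, hfx]; rfl
      have hgd : (pvAfold A).2.1.getD x 0 = fx := by
        rw [PySem.Dict.getD_eq_get?_getD, h2, hfx]; rfl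
      have hstep : pvStepA (pvAfold A) ((A.length : Int), x)
          = if (A.length : Int) - fx > (pvAfold A).1 then
              ((A.length : Int) - fx, (pvAfold A).2.1, fx, (A.length : Int))
            else (pvAfold A) := by
        unfold pvStepA
        rw [if_neg (by simp [hcf]), hgd]
      rw [hstep]
      simp only [hmem, if_true, hfx, Option.getD_some]
      constructor
      · by_cases hgt : (A.length : Int) - fx > (pvAfold A).1
        · rw [if_pos hgt]
          exact (pvStepB_eq_of_lt (pvB A) _ _ _ (by rw [e1] at hgt; omega)).symm
        · rw [if_neg hgt]
          rw [pvStepB_eq_of_ge (pvB A) _ _ _ (by rw [e1] at hgt; omega)]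
          exact h1
      · intro y
        have hproj : (if (A.length : Int) - fx > (pvAfold A).1 then
              ((A.length : Int) - fx, (pvAfold A).2.1, fx, (A.length : Int))
            else (pvAfold A)).2.1 = (pvAfold A).2.1 := by
          split <;> rfl
        rw [hproj, h2, pvFidx_snoc]
        cases hf : pvFidx A 0 y with
        | some j => rfl
        | none =>
          have hyA : y ∉ A := by
            intro hy
            have := (pvFidx_isSome_iff_mem A 0 y).mpr hy
            rw [hf] at this; cases this
          have hne : x ≠ y := fun he => hyA (he ▸ hmem)
          simp [hne]
    · have hnone : pvFidx A 0 x = none := by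
        cases hf : pvFidx A 0 x with
        | none => rfl
        | some j =>
          exact absurd ((pvFidx_isSome_iff_mem A 0 x).mp (by simp [hf])) hmem
      have hcf : (pvAfold A).2.1.contains x = false := by rw [hcont, hnone]; rfl
      have hstep : pvStepA (pvAfold A) ((A.length : Int), x)
          = ((pvAfold A).1, (pvAfold A).2.1.insert x (A.length : Int),
             (pvAfold A).2.2.1, (pvAfold A).2.2.2) := by
        unfold pvStepA
        simp [hcf]
      rw [hstep]
      simp only [hmem, if_false]
      refine ⟨by rw [← h1], fun y => ?_⟩
      rw [PySem.Dict.get?_insert, h2, pvFidx_snoc]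
      by_cases hy : y = x
      · simp [hy, hnone]
      · cases hf : pvFidx A 0 y with
        | some j => simp [hy]
        | none => simp [hy, Ne.symm hy]

theorem pv_foldA_conv (A : List Int) :
    (PySem.List.pyRange 0 (A.length : Int) 1).foldl
      (fun (s : Int × PySem.Dict Int Int × Int × Int) i =>
        let x := PySem.List.pyGetD A i 0
        if s.2.1.contains x = false then
          (s.1, s.2.1.insert x i, s.2.2.1, s.2.2.2)
        else
          let temp := i - s.2.1.getD x 0
          if temp > s.1 then (temp, s.2.1, s.2.1.getD x 0, i)
          else (s.1, s.2.1, s.2.2.1, s.2.2.2))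
      (-10 ^ 6, PySem.Dict.empty, -1, -1)
      = (PySem.List.enumerate A 0).foldl pvStepA (-10 ^ 6, PySem.Dict.empty, -1, -1) := by
  rw [PySem.List.enumerate_eq_map_pyRange (d := 0), List.foldl_map]
  rfl

-- ===== VERDICT (by name: the statement is the Claim_ definition above) =====
theorem get_max_distance_duplicate_spec : Claim_equal_get_max_distance_duplicate := by
  intro A _
  unfold Spec_get_max_distance_duplicate
  obtain ⟨hA1, -⟩ := pvA_char A
  obtain ⟨h1, h2, h3⟩ := pvBuild_char A
  have hA : get_max_distance_duplicate A = [(pvB A).2.1, (pvB A).2.2] := by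
    simp only [get_max_distance_duplicate]
    rw [pv_foldA_conv]
    exact congrArg (fun t : Int × Int × Int => [t.2.1, t.2.2]) hA1
  have hfold : (pvBuild A).1.keys.foldl
      (fun (s : Int × Int × Int) x =>
        if (pvBuild A).2.getD x 0 ≠ (pvBuild A).1.getD x 0 then
          if (pvBuild A).2.getD x 0 - (pvBuild A).1.getD x 0 > s.1 then
            ((pvBuild A).2.getD x 0 - (pvBuild A).1.getD x 0,
             (pvBuild A).1.getD x 0, (pvBuild A).2.getD x 0)
          else s
        else s) (-10 ^ 6, -1, -1) = pvB A := by
    rw [h3]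
    unfold pvB
    refine PySem.List.foldl_congr_mem (pvKeys A) _ _ _ (fun acc y hy => ?_)
    have hf : (pvBuild A).1.getD y 0 = (pvFidx A 0 y).getD 0 := by
      rw [PySem.Dict.getD_eq_get?_getD, h1]
    have hl : (pvBuild A).2.getD y 0 = (pvLidx A 0 y).getD 0 := by
      rw [PySem.Dict.getD_eq_get?_getD, h2]
    unfold pvStepK pvStepB
    rw [hf, hl]
  have hB : get_max_distance_duplicate_alt A = [(pvB A).2.1, (pvB A).2.2] := by
    simp only [get_max_distance_duplicate_alt]
    exact congrArg (fun t : Int × Int × Int => [t.2.1, t.2.2]) hfold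
  rw [hA, hB]
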